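-- pv_equiv track=rewrite | github.com/idev006/MTMediaverse | app/viewmodels/order_vm.py | check_order_duplicates
-- ===== SOURCE A (Python) =====
-- from typing import Any, Dict, List, Optional, Set, Tuple
--
-- def check_order_duplicates(media_ids: List[int]) -> Tuple[bool, List[int]]:
--     """
--     Check if there are duplicate media IDs in the order request.
--
--     IRON RULE #2: ห้ามมีรายการคลิปซ้ำในบิลเดียวกัน
--
--     Args:
--         media_ids: List of media IDs in the order
--
--     Returns:
--         Tuple of (has_duplicates, list of duplicate IDs)
--     """
--     seen: Set[int] = set()
--     duplicates: List[int] = []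
--
--     for media_id in media_ids:
--         if media_id in seen:
--             duplicates.append(media_id)
--         else:
--             seen.add(media_id)
--
--     return len(duplicates) > 0, duplicates
-- ===== SOURCE B (Python) =====
-- from typing import List, Tuple
--
-- def check_order_duplicates(media_ids: List[int]) -> Tuple[bool, List[int]]:
--     # Pass 1: map each id to its FIRST index (reversed comprehension: earlier entries overwrite later).
--     first = {x: i for i, x in reversed(list(enumerate(media_ids)))}
--     # Pass 2: an occurrence is a duplicate iff it is not the first occurrence of its value.
--     duplicates = [x for i, x in enumerate(media_ids) if first[x] != i]
--     return bool(duplicates), duplicates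
-- ===== Notes on version B (the rewrite author's own statement) =====
-- stated objective: alternative
-- what changed: Replaced A's single pass with a mutable seen-set and branch by two staged passes: first build a value-to-first-index map with a reversed dict comprehension, then filter occurrences whose index differs from their value's first index.
import Mathlib
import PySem

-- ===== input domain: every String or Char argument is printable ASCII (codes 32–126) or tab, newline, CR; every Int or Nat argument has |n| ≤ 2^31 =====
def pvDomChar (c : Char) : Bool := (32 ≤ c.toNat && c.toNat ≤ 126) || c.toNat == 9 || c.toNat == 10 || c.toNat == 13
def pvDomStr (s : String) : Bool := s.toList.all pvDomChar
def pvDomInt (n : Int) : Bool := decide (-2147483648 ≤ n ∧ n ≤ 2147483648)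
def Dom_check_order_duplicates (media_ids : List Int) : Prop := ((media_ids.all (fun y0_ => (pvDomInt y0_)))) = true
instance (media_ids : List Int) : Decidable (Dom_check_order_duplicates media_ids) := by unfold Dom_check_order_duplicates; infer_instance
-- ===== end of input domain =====

-- B replaces A's one-pass seen-set loop by two staged passes: a first-occurrence-index map built
-- from the reversed enumeration, then a filter comparing each index with its value's first index
-- (same return value; objective: alternative, same O(n) cost).


-- ===== PORT A =====
-- the loop body: if media_id in seen: duplicates.append(media_id) else: seen.add(media_id)
def coDupStep (st : PySem.Set Int × List Int) (media_id : Int) : PySem.Set Int × List Int :=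
  if PySem.Set.contains st.1 media_id then (st.1, st.2 ++ [media_id])
  else (PySem.Set.add st.1 media_id, st.2)

def check_order_duplicates (media_ids : List Int) : Bool × List Int :=
  let st := media_ids.foldl coDupStep (PySem.Set.empty, [])
  (decide (0 < st.2.length), st.2)

-- ===== PORT B =====
-- first = {x: i for i, x in reversed(list(enumerate(media_ids)))}
def coFirstMap (media_ids : List Int) : PySem.Dict Int Int :=
  ((PySem.List.enumerate media_ids 0).reverse).foldl
    (fun d p => d.insert p.2 p.1) PySem.Dict.empty

-- duplicates = [x for i, x in enumerate(media_ids) if first[x] != i]; return bool(duplicates), duplicates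
def check_order_duplicates_alt (media_ids : List Int) : Bool × List Int :=
  let first := coFirstMap media_ids
  let duplicates := ((PySem.List.enumerate media_ids 0).filter
      (fun p => decide (first.getD p.2 0 ≠ p.1))).map (·.2)
  (decide (duplicates ≠ []), duplicates)

-- ===== PRECONDITION & SPEC =====
def Spec_check_order_duplicates (media_ids : List Int) (out : Bool × List Int) : Prop := out = check_order_duplicates_alt media_ids
instance (media_ids : List Int) (out : Bool × List Int) : Decidable (Spec_check_order_duplicates media_ids out) := by unfold Spec_check_order_duplicates; infer_instance

-- ===== CLAIM (what is proved, stated in full; the proofs are below) =====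
def Claim_equal_check_order_duplicates : Prop := ∀ (media_ids : List Int), Dom_check_order_duplicates media_ids → Spec_check_order_duplicates media_ids (check_order_duplicates media_ids)

-- ===== LEMMAS AND PROOFS =====

-- loop invariant for A: with 'seen' holding exactly the elements of the processed prefix 'pre',
-- the rest of A's loop appends exactly the duplicates (prefix-membership test) of the remaining suffix.
theorem coDup_key (full : List Int) : ∀ (ys pre : List Int) (seen : PySem.Set Int) (dups : List Int),
    full = pre ++ ys → (∀ x, PySem.Set.contains seen x = true ↔ x ∈ pre) →
    (ys.foldl coDupStep (seen, dups)).2 =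
      dups ++ ((PySem.List.enumerate ys (pre.length : Int)).filter
        (fun p => decide (p.2 ∈ PySem.List.slice full none (some p.1)))).map (·.2) := by
  intro ys
  induction ys with
  | nil => intro pre seen dups _ _; simp [PySem.List.enumerate_nil]
  | cons y ys ih =>
    intro pre seen dups hfull hseen
    have hslice : PySem.List.slice full none (some (pre.length : Int)) = pre := by
      rw [PySem.List.slice_to_natCast, hfull]
      simp
    have hlen : ((pre.length : Int) + 1) = ((pre ++ [y]).length : Int) := by simp
    rw [PySem.List.enumerate_cons, List.filter_cons]
    by_cases hy : y ∈ pre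
    · have hc : PySem.Set.contains seen y = true := (hseen y).mpr hy
      have hcond : decide (y ∈ PySem.List.slice full none (some (pre.length : Int))) = true := by
        simp [hslice, hy]
      simp only [List.foldl_cons, coDupStep, hc, if_true]
      rw [if_pos hcond, hlen,
        ih (pre ++ [y]) seen (dups ++ [y]) (by simp [hfull]) (by
          intro x; rw [hseen x]; simp
          intro hx; subst hx; exact hy)]
      simp
    · have hc : PySem.Set.contains seen y = false := by
        rw [Bool.eq_false_iff]; intro h; exact hy ((hseen y).mp h)
      have hcond : ¬ (decide (y ∈ PySem.List.slice full none (some (pre.length : Int))) = true) := by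
        simp [hslice, hy]
      simp only [List.foldl_cons, coDupStep, hc, Bool.false_eq_true, if_false]
      rw [if_neg hcond, hlen,
        ih (pre ++ [y]) (PySem.Set.add seen y) dups (by simp [hfull]) (by
          intro x
          rw [PySem.Set.contains_iff, PySem.Set.mem_add, ← PySem.Set.contains_iff, hseen x]
          simp)]

-- a foldl of overwriting inserts is looked up through the LAST matching pair of the folded list
theorem coFold_get? : ∀ (l : List (Int × Int)) (d : PySem.Dict Int Int) (k : Int),
    (l.foldl (fun d p => d.insert p.2 p.1) d).get? k =
      (match l.reverse.find? (fun p => p.2 == k) with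
       | some p => some p.1
       | none => d.get? k) := by
  intro l
  induction l with
  | nil => intro d k; simp
  | cons x l ih =>
    intro d k
    rw [List.foldl_cons, ih, List.reverse_cons, List.find?_append]
    cases h : l.reverse.find? (fun p => p.2 == k) with
    | some p => simp
    | none =>
      simp only [Option.none_or]
      rw [PySem.Dict.get?_insert]
      by_cases hk : x.2 = k
      · simp [hk]
      · simp [hk, Ne.symm hk]

-- find? over an enumeration returns the FIRST occurrence with its (offset) index
theorem coFind_enumerate (x : Int) : ∀ (ids : List Int) (s : Int),
    (PySem.List.enumerate ids s).find? (fun p => p.2 == x) =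
      (if x ∈ ids then some (s + (ids.idxOf x : Int), x) else none) := by
  intro ids
  induction ids with
  | nil => intro s; simp [PySem.List.enumerate_nil]
  | cons y ys ih =>
    intro s
    rw [PySem.List.enumerate_cons, List.find?_cons]
    by_cases hy : y = x
    · subst hy; simp [List.idxOf_cons_self]
    · have hb : ((s, y).2 == x) = false := by simp [hy]
      have hbx : (y == x) = false := by simp [hy]
      rw [hb, ih (s + 1), List.idxOf_cons, hbx]
      simp only [List.mem_cons, Ne.symm hy, false_or, cond_false]
      by_cases hx : x ∈ ys
      · rw [if_pos hx, if_pos hx]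
        congr 2
        push_cast; ring
      · rw [if_neg hx, if_neg hx]

-- hence the first-occurrence map looks up the idxOf of any member
theorem coFirstMap_getD (ids : List Int) (x : Int) (hx : x ∈ ids) :
    (coFirstMap ids).getD x 0 = (ids.idxOf x : Int) := by
  unfold coFirstMap
  rw [PySem.Dict.getD_eq_get?_getD, coFold_get?, List.reverse_reverse, coFind_enumerate,
    if_pos hx]
  simp

-- an occurrence at index k is in its own proper prefix iff it is not the first occurrence
theorem coMem_take_iff (x : Int) : ∀ (ids : List Int) (k : Nat) (h : k < ids.length),
    ids[k] = x → (x ∈ ids.take k ↔ ids.idxOf x ≠ k) := by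
  intro ids
  induction ids with
  | nil => intro k h; simp at h
  | cons y ys ih =>
    intro k h hx
    cases k with
    | zero =>
      simp at hx; subst hx
      simp [List.idxOf_cons_self]
    | succ k =>
      simp only [List.getElem_cons_succ] at hx
      rw [List.take_succ_cons, List.mem_cons, List.idxOf_cons]
      by_cases hy : y = x
      · subst hy; simp
      · have hk : k < ys.length := by simpa using h
        have hbx : (y == x) = false := by simp [hy]
        have hih := ih k hk hx
        rw [hbx, cond_false, hih]
        constructor
        · rintro (h1 | h1)
          · exact absurd h1.symm hy
          · omega
        · intro h1
          right
          omega

theorem coDup_eq (media_ids : List Int) :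
    check_order_duplicates media_ids = check_order_duplicates_alt media_ids := by
  have h := coDup_key media_ids media_ids [] PySem.Set.empty []
    (by simp) (by intro x; simp [PySem.Set.contains, PySem.Set.empty])
  simp only [List.length_nil, Nat.cast_zero, List.nil_append] at h
  have hfilter : ((PySem.List.enumerate media_ids 0).filter
        (fun p => decide ((coFirstMap media_ids).getD p.2 0 ≠ p.1))) =
      ((PySem.List.enumerate media_ids 0).filter
        (fun p => decide (p.2 ∈ PySem.List.slice media_ids none (some p.1)))) := by
    apply List.filter_congr
    intro p hp
    rw [PySem.List.mem_enumerate_iff] at hp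
    obtain ⟨k, hk, rfl⟩ := hp
    have hmem : media_ids[k] ∈ media_ids := List.getElem_mem hk
    simp only [Int.zero_add]
    rw [coFirstMap_getD media_ids _ hmem, PySem.List.slice_to_natCast,
      decide_eq_decide, coMem_take_iff media_ids[k] media_ids k hk rfl]
    omega
  show (decide (0 < (media_ids.foldl coDupStep (PySem.Set.empty, [])).2.length),
        (media_ids.foldl coDupStep (PySem.Set.empty, [])).2) =
       (decide ((((PySem.List.enumerate media_ids 0).filter
            (fun p => decide ((coFirstMap media_ids).getD p.2 0 ≠ p.1))).map (·.2)) ≠ []),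
        ((PySem.List.enumerate media_ids 0).filter
            (fun p => decide ((coFirstMap media_ids).getD p.2 0 ≠ p.1))).map (·.2))
  rw [h, hfilter]
  congr 1
  rw [decide_eq_decide]
  exact List.length_pos_iff

-- ===== VERDICT (by name: the statement is the Claim_ definition above) =====
theorem check_order_duplicates_spec : Claim_equal_check_order_duplicates := by
  intro media_ids _
  unfold Spec_check_order_duplicates
  exact coDup_eq media_ids
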